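-- pv_equiv track=rewrite | github.com/khjkhj0329/CodingTest | 단체 유니폼 구하기.py | solution
-- ===== SOURCE A (Python) =====
-- def solution(people):
-- 	answer = [0 for _ in range(4)]
-- 	for i in people:
-- 		if i < 95:
-- 			answer[0] += 1
-- 		elif i >= 95 and i < 100:
-- 			answer[1] += 1
-- 		elif i >= 100 and i < 105:
-- 			answer[2] += 1
-- 		elif i >= 105:
-- 			answer[3] += 1
-- 	return answer
-- ===== SOURCE B (Python) =====
-- def solution(people):
--     # cumulative counts below each boundary; bucket sizes are their differences
--     below = [sum(1 for h in people if h < b) for b in (95, 100, 105)]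
--     return [below[0], below[1] - below[0], below[2] - below[1], len(people) - below[2]]
-- ===== Notes on version B (the rewrite author's own statement) =====
-- stated objective: alternative
-- what changed: Replaces the per-element if/elif branch ladder over a mutated 4-slot array with three cumulative 'count below boundary' passes whose consecutive differences give the bucket sizes directly.
import Mathlib
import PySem

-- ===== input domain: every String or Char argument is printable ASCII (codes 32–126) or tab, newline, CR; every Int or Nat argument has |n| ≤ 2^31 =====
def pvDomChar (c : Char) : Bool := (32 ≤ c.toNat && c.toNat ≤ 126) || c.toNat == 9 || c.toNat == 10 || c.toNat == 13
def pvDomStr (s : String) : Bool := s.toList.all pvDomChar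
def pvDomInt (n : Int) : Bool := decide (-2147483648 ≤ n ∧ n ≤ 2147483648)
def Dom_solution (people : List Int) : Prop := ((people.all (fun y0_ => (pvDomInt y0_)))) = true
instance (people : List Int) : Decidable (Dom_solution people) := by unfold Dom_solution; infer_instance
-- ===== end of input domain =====

-- B replaces A's if/elif ladder over a mutated 4-slot array with cumulative below-boundary counts whose differences are the buckets (alternative decomposition, same cost).

-- ===== PORT A =====
def solution (people : List Int) : List Int :=
  people.foldl (fun answer i =>
    if i < 95 then answer.set 0 (answer.getD 0 0 + 1)
    else if 95 ≤ i ∧ i < 100 then answer.set 1 (answer.getD 1 0 + 1)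
    else if 100 ≤ i ∧ i < 105 then answer.set 2 (answer.getD 2 0 + 1)
    else if 105 ≤ i then answer.set 3 (answer.getD 3 0 + 1)
    else answer) [0, 0, 0, 0]

-- ===== PORT B =====
-- sum(1 for h in people if h < b), as a fold
def countBelow (people : List Int) (b : Int) : Int :=
  people.foldl (fun acc h => if h < b then acc + 1 else acc) 0

def solution_alt (people : List Int) : List Int :=
  let below := [countBelow people 95, countBelow people 100, countBelow people 105]
  [below.getD 0 0, below.getD 1 0 - below.getD 0 0, below.getD 2 0 - below.getD 1 0,
   (people.length : Int) - below.getD 2 0]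

-- ===== PRECONDITION & SPEC =====
def Spec_solution (people : List Int) (out : List Int) : Prop := out = solution_alt people
instance (people : List Int) (out : List Int) : Decidable (Spec_solution people out) := by unfold Spec_solution; infer_instance

-- ===== CLAIM (what is proved, stated in full; the proofs are below) =====
def Claim_equal_solution : Prop := ∀ (people : List Int), Dom_solution people → Spec_solution people (solution people)

-- ===== LEMMAS AND PROOFS =====

theorem countBelow_acc (b : Int) (people : List Int) (acc : Int) :
    people.foldl (fun acc h => if h < b then acc + 1 else acc) acc
      = acc + countBelow people b := by
  induction people generalizing acc with
  | nil => simp [countBelow]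
  | cons h t ih =>
    simp only [countBelow, List.foldl_cons]
    rw [ih, ih (if h < b then 0 + 1 else 0)]
    split_ifs <;> ring

theorem countBelow_cons (h : Int) (t : List Int) (b : Int) :
    countBelow (h :: t) b = (if h < b then 1 else 0) + countBelow t b := by
  simp only [countBelow, List.foldl_cons]
  rw [countBelow_acc]
  simp only [countBelow]
  split_ifs <;> omega

theorem solution_closed (people : List Int) (a b c d : Int) :
    people.foldl (fun answer i =>
      if i < 95 then answer.set 0 (answer.getD 0 0 + 1)
      else if 95 ≤ i ∧ i < 100 then answer.set 1 (answer.getD 1 0 + 1)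
      else if 100 ≤ i ∧ i < 105 then answer.set 2 (answer.getD 2 0 + 1)
      else if 105 ≤ i then answer.set 3 (answer.getD 3 0 + 1)
      else answer) [a, b, c, d]
    = [a + countBelow people 95,
       b + (countBelow people 100 - countBelow people 95),
       c + (countBelow people 105 - countBelow people 100),
       d + ((people.length : Int) - countBelow people 105)] := by
  induction people generalizing a b c d with
  | nil => simp [countBelow]
  | cons h t ih =>
    rw [List.foldl_cons, countBelow_cons, countBelow_cons, countBelow_cons,
      List.length_cons]
    split_ifs <;>
      (first
        | rw [show ([a, b, c, d].set 0 ([a, b, c, d].getD 0 0 + 1)) = [a + 1, b, c, d] from rfl, ih]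
        | rw [show ([a, b, c, d].set 1 ([a, b, c, d].getD 1 0 + 1)) = [a, b + 1, c, d] from rfl, ih]
        | rw [show ([a, b, c, d].set 2 ([a, b, c, d].getD 2 0 + 1)) = [a, b, c + 1, d] from rfl, ih]
        | rw [show ([a, b, c, d].set 3 ([a, b, c, d].getD 3 0 + 1)) = [a, b, c, d + 1] from rfl, ih]
        | rw [ih])
      <;> simp only [List.cons.injEq, and_true] <;> push_cast <;> omega

-- ===== VERDICT (by name: the statement is the Claim_ definition above) =====
theorem solution_spec : Claim_equal_solution := by
  intro people _
  unfold Spec_solution solution solution_alt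
  rw [solution_closed]
  simp [List.getD]
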